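-- pv_equiv track=rewrite | github.com/PycWB/pycwb | pycwb/modules/config_repo_parser/config_repo_parser.py | _match_path_components
-- ===== SOURCE A (Python) =====
-- from typing import Dict, List, Optional, Tuple
--
-- def _match_path_components(target_parts: List[str], actual_components: List[str]) -> Optional[int]:
--     """
--     Try to match actual directory components against the underscore-split parts.
--
--     Returns the number of target_parts consumed if match is found, None otherwise.
--
--     Example:
--         target_parts = ["BurstHF", "LH", "SIM", "NSGlitch", "Set1", "extra"]
--         actual_components = ["BurstHF", "LH", "SIM", "NSGlitch_Set1"]
--         Returns: 5 (BurstHF + LH + SIM + NSGlitch_Set1 consumed 5 parts when reconstructed with underscores)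
--     """
--     if not actual_components:
--         return None
--
--     # Try to match actual_components sequentially against target_parts
--     target_idx = 0
--
--     for actual_comp in actual_components:
--         # Split actual component by underscores to see how many target parts it uses
--         actual_split = actual_comp.split('_')
--
--         # Check if target_parts starting at target_idx match this component
--         needed_parts = len(actual_split)
--         if target_idx + needed_parts > len(target_parts):
--             return None  # Not enough target parts left
--
--         # Check if the parts match
--         if target_parts[target_idx:target_idx + needed_parts] == actual_split:
--             target_idx += needed_parts
--         else:
--             return None  # Mismatch
--
--     return target_idx
-- ===== SOURCE B (Python) =====
-- from typing import List, Optional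
--
-- def _match_path_components(target_parts: List[str], actual_components: List[str]) -> Optional[int]:
--     if not actual_components:
--         return None
--     flattened = [part for comp in actual_components for part in comp.split('_')]
--     total = len(flattened)
--     if total > len(target_parts):
--         return None
--     if target_parts[:total] == flattened:
--         return total
--     return None
-- ===== Notes on version B (the rewrite author's own statement) =====
-- stated objective: simpler
-- what changed: Replaces the per-component incremental index walk with per-component slice comparisons by one flatten of all underscore-split parts followed by a single prefix comparison against target_parts.
import Mathlib
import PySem

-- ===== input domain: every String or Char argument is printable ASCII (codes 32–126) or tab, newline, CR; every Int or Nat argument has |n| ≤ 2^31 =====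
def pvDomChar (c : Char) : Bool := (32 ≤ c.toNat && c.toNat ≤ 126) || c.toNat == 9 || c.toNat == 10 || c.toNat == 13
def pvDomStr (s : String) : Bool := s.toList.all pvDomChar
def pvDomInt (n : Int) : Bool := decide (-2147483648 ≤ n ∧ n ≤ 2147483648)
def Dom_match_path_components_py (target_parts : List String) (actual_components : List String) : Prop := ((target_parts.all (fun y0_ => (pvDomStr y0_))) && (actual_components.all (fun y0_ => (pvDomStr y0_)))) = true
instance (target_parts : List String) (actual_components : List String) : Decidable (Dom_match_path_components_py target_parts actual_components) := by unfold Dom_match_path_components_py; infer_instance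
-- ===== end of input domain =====

-- B flattens all underscore-split parts once and does a single prefix comparison,
-- instead of A's incremental index walk with per-component slice comparisons (objective: simpler).

-- ===== PORT A =====
-- s.split('_'): sep '_' is nonempty so Str.split? is always 'some'; exact Python semantics
def pvSplitUnd (s : String) : List String := (PySem.Str.split? s "_").getD []

-- the 'for actual_comp in actual_components' loop with its target_idx accumulator
def pvLoopA (target : List String) (i : Nat) : List String → Option Int
  | [] => some (i : Int)
  | c :: cs =>
    let actual_split := pvSplitUnd c
    let needed := actual_split.length
    if (i + needed : Nat) > target.length then none
    else if PySem.List.slice target (some (i : Int)) (some ((i : Int) + (needed : Int))) = actual_split then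
      pvLoopA target (i + needed) cs
    else none

def match_path_components_py (target_parts : List String) (actual_components : List String) : Option Int :=
  if actual_components = [] then none
  else pvLoopA target_parts 0 actual_components

-- ===== PORT B =====
def match_path_components_py_alt (target_parts : List String) (actual_components : List String) : Option Int :=
  if actual_components = [] then none
  else
    let flattened := actual_components.flatMap (fun c => pvSplitUnd c)
    let total := flattened.length
    if (total : Nat) > target_parts.length then none
    else if target_parts.take total = flattened then some (total : Int)
    else none

-- ===== PRECONDITION & SPEC =====
def Spec_match_path_components_py (target_parts : List String) (actual_components : List String) (out : Option Int) : Prop := out = match_path_components_py_alt target_parts actual_components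
instance (target_parts : List String) (actual_components : List String) (out : Option Int) : Decidable (Spec_match_path_components_py target_parts actual_components out) := by unfold Spec_match_path_components_py; infer_instance

-- ===== CLAIM (what is proved, stated in full; the proofs are below) =====
def Claim_equal_match_path_components_py : Prop := ∀ (target_parts : List String) (actual_components : List String), Dom_match_path_components_py target_parts actual_components → Spec_match_path_components_py target_parts actual_components (match_path_components_py target_parts actual_components)

-- ===== LEMMAS AND PROOFS =====

-- A's loop from index i computes the one-shot flatten-and-compare answer on the rest.
theorem pvLoopA_eq (target : List String) (cs : List String) :
    ∀ i : Nat, i ≤ target.length →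
      pvLoopA target i cs =
        (if i + (cs.flatMap (fun c => pvSplitUnd c)).length > target.length then none
         else if (target.drop i).take (cs.flatMap (fun c => pvSplitUnd c)).length
              = cs.flatMap (fun c => pvSplitUnd c) then
           some ((i + (cs.flatMap (fun c => pvSplitUnd c)).length : Nat) : Int)
         else none) := by
  induction cs with
  | nil =>
    intro i hi
    simp only [pvLoopA, List.flatMap_nil, List.length_nil, Nat.add_zero, List.take_zero]
    rw [if_neg (by omega)]
    simp
  | cons c cs ih =>
    intro i hi
    simp only [pvLoopA, List.flatMap_cons]
    set sp := pvSplitUnd c with hsp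
    set rest := cs.flatMap (fun c => pvSplitUnd c) with hrest
    have hlen : (sp ++ rest).length = sp.length + rest.length := List.length_append
    by_cases hov : i + sp.length > target.length
    · rw [if_pos hov, if_pos (by omega)]
    · have hle : i + sp.length ≤ target.length := by omega
      rw [if_neg hov, PySem.List.slice_natCast_add]
      by_cases hm : (target.drop i).take sp.length = sp
      · rw [if_pos hm, ih (i + sp.length) hle]
        have hsplit : (target.drop i).take (sp ++ rest).length
            = sp ++ (target.drop (i + sp.length)).take rest.length := by
          rw [hlen, List.take_add, List.drop_drop, hm]
        have e1 : i + (sp ++ rest).length = i + sp.length + rest.length := by omega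
        rw [hsplit, e1]
        simp only [List.append_cancel_left_eq]
      · rw [if_neg hm]
        by_cases hov2 : i + (sp ++ rest).length > target.length
        · rw [if_pos hov2]
        · have hne : ¬ ((target.drop i).take (sp ++ rest).length = sp ++ rest) := by
            intro h
            apply hm
            have h2 := congrArg (List.take sp.length) h
            rwa [List.take_take, hlen, Nat.min_def, if_pos (by omega), List.take_left] at h2
          rw [if_neg hov2, if_neg hne]

-- ===== VERDICT (by name: the statement is the Claim_ definition above) =====
theorem match_path_components_py_spec : Claim_equal_match_path_components_py := by
  intro target_parts actual_components _
  unfold Spec_match_path_components_py match_path_components_py match_path_components_py_alt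
  by_cases h : actual_components = []
  · simp [h]
  · simp only [h, if_false]
    rw [pvLoopA_eq target_parts actual_components 0 (Nat.zero_le _)]
    simp
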